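-- pv_equiv track=rewrite | github.com/RiaKokate/Machine-Learning-for-RNA-3D-Structure-Prediction | app.py | _colorize_seq
-- ===== SOURCE A (Python) =====
-- BASE_COLORS   = {"A":"#e74c3c","U":"#3498db","G":"#2ecc71","C":"#f1c40f"}
--
-- def _colorize_seq(seq: str) -> str:
--     spans = []
--     for c in seq.upper():
--         if c in BASE_COLORS:
--             spans.append(f'<span class="base-{c}">{c}</span>')
--         elif c in {'-','.'}: spans.append(f'<span style="color:#4a5568">{c}</span>')
--         else: spans.append(f'<span style="color:#94a3b8">{c}</span>')
--     # group into blocks of 10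
--     out, block = [], []
--     for i, s in enumerate(spans):
--         block.append(s)
--         if (i+1) % 10 == 0:
--             out.append(''.join(block))
--             block = []
--     if block: out.append(''.join(block))
--     return ' '.join(out)
-- ===== SOURCE B (Python) =====
-- BASE_COLORS = {"A":"#e74c3c","U":"#3498db","G":"#2ecc71","C":"#f1c40f"}
--
-- def _span(c: str) -> str:
--     if c in BASE_COLORS:
--         return f'<span class="base-{c}">{c}</span>'
--     if c in {'-','.'}:
--         return f'<span style="color:#4a5568">{c}</span>'
--     return f'<span style="color:#94a3b8">{c}</span>'
--
-- def _colorize_seq(seq: str) -> str: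
--     s = seq.upper()
--     blocks = []
--     for i in range(0, len(s), 10):
--         blocks.append(''.join(_span(c) for c in s[i:i+10]))
--     return ' '.join(blocks)
-- ===== Notes on version B (the rewrite author's own statement) =====
-- stated objective: alternative
-- what changed: Replaces A's two passes (build a flat span list, then regroup it with an enumerate/modulo counter and a trailing-block flush) by a single nested traversal over fixed-width slices: for each 10-char slice of the uppercased string, colorize its characters and join them into one block, then join blocks with spaces.
import Mathlib
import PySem

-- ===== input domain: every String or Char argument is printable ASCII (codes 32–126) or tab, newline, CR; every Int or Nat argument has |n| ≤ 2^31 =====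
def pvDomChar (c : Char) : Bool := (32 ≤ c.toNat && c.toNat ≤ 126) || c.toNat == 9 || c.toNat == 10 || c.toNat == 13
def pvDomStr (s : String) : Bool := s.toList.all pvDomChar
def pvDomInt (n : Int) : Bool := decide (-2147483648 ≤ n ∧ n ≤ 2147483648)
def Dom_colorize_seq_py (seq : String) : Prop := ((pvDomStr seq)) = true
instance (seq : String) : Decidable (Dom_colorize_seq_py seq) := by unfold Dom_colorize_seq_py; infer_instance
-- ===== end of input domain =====

-- B replaces A's flat-spans-then-regroup-by-counter passes with one nested traversal over 10-char slices; alternative decomposition, same cost.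

-- ===== PORT A =====
-- A, step for step: build the span list with a loop appending one span per char,
-- then regroup with an enumerate loop flushing when (i+1) % 10 == 0, flush the trailing block, join with ' '.
def colorize_seq_py (seq : String) : String :=
  let spans : List (List Char) :=
    (PySem.Chars.upper seq.toList).foldl (fun acc c =>
      acc ++ [if c = 'A' ∨ c = 'U' ∨ c = 'G' ∨ c = 'C' then
                "<span class=\"base-".toList ++ [c] ++ "\">".toList ++ [c] ++ "</span>".toList
              else if c = '-' ∨ c = '.' then
                "<span style=\"color:#4a5568\">".toList ++ [c] ++ "</span>".toList
              else
                "<span style=\"color:#94a3b8\">".toList ++ [c] ++ "</span>".toList]) []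
  let r :=
    (PySem.List.enumerate spans).foldl
      (fun (st : List (List Char) × List (List Char)) is =>
        let block := st.2 ++ [is.2]
        if PySem.Int.mod (is.1 + 1) 10 = 0 then (st.1 ++ [PySem.Chars.join [] block], [])
        else (st.1, block)) ([], [])
  let out := if r.2 ≠ [] then r.1 ++ [PySem.Chars.join [] r.2] else r.1
  String.ofList (PySem.Chars.join [' '] out)

-- ===== PORT B =====
-- B's helper _span
def pvSpanB (c : Char) : List Char :=
  if c = 'A' ∨ c = 'U' ∨ c = 'G' ∨ c = 'C' then
    "<span class=\"base-".toList ++ [c] ++ "\">".toList ++ [c] ++ "</span>".toList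
  else if c = '-' ∨ c = '.' then
    "<span style=\"color:#4a5568\">".toList ++ [c] ++ "</span>".toList
  else
    "<span style=\"color:#94a3b8\">".toList ++ [c] ++ "</span>".toList

-- B: uppercase once, then for i in range(0, len(s), 10) join the colorized chars of s[i:i+10]; join blocks with ' '.
def colorize_seq_py_alt (seq : String) : String :=
  let s := PySem.Chars.upper seq.toList
  let blocks : List (List Char) :=
    (PySem.List.pyRange 0 (s.length : Int) 10).map (fun i =>
      PySem.Chars.join [] ((PySem.List.slice s (some i) (some (i + 10))).map pvSpanB))
  String.ofList (PySem.Chars.join [' '] blocks)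

-- ===== PRECONDITION & SPEC =====
def Spec_colorize_seq_py (seq : String) (out : String) : Prop := out = colorize_seq_py_alt seq
instance (seq : String) (out : String) : Decidable (Spec_colorize_seq_py seq out) := by unfold Spec_colorize_seq_py; infer_instance

-- ===== CLAIM (what is proved, stated in full; the proofs are below) =====
def Claim_equal_colorize_seq_py : Prop := ∀ (seq : String), Dom_colorize_seq_py seq → Spec_colorize_seq_py seq (colorize_seq_py seq)

-- ===== LEMMAS AND PROOFS =====

-- chunks of 10 (proof-only canonical form both sides are reduced to)
def pvChunks {α : Type} (l : List α) : List (List α) :=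
  if h : l = [] then [] else l.take 10 :: pvChunks (l.drop 10)
termination_by l.length
decreasing_by simp [List.length_drop]; exact List.length_pos_iff.mpr h

-- A's regroup loop, written as a recursion on the span list (flush when the block reaches 10)
def pvGroupTail (block : List (List Char)) : List (List Char) → List (List Char)
  | [] => if block = [] then [] else [PySem.Chars.join [] block]
  | s :: rest =>
      if block.length + 1 = 10 then PySem.Chars.join [] (block ++ [s]) :: pvGroupTail [] rest
      else pvGroupTail (block ++ [s]) rest

-- A's loop step and the post-loop trailing flush, named for the proof (definitionally the port's lambda)
def pvStepA (st : List (List Char) × List (List Char)) (is : Int × List Char) :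
    List (List Char) × List (List Char) :=
  if PySem.Int.mod (is.1 + 1) 10 = 0 then (st.1 ++ [PySem.Chars.join [] (st.2 ++ [is.2])], [])
  else (st.1, st.2 ++ [is.2])

def pvFlush (r : List (List Char) × List (List Char)) : List (List Char) :=
  if r.2 ≠ [] then r.1 ++ [PySem.Chars.join [] r.2] else r.1

lemma pvGroupA (sp : List (List Char)) : ∀ (i0 : Int) (out block : List (List Char)),
    0 ≤ i0 → PySem.Int.mod i0 10 = (block.length : Int) →
    pvFlush ((PySem.List.enumerate sp i0).foldl pvStepA (out, block)) =
      out ++ pvGroupTail block sp := by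
  induction sp with
  | nil =>
    intro i0 out block h0 hm
    simp only [PySem.List.enumerate_nil, List.foldl_nil, pvGroupTail, pvFlush]
    split_ifs with h <;> simp_all
  | cons s rest ih =>
    intro i0 out block h0 hm
    rw [PySem.Int.mod_eq_emod_of_pos (by omega)] at hm
    have hb : (block.length : Int) < 10 := by omega
    rw [PySem.List.enumerate_cons, List.foldl_cons]
    by_cases hc : (i0 + 1) % 10 = 0
    · have hlen : block.length + 1 = 10 := by omega
      have hstep : pvStepA (out, block) (i0, s) =
          (out ++ [PySem.Chars.join [] (block ++ [s])], []) := by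
        simp [pvStepA, hc]
      rw [hstep, ih (i0 + 1) _ [] (by omega)
        (by rw [PySem.Int.mod_eq_emod_of_pos (by omega)]; simpa using hc)]
      rw [pvGroupTail, if_pos hlen]
      simp
    · have hlen : ¬ block.length + 1 = 10 := by omega
      have hstep : pvStepA (out, block) (i0, s) = (out, block ++ [s]) := by
        simp [pvStepA, hc]
      rw [hstep, ih (i0 + 1) out (block ++ [s]) (by omega)
        (by rw [PySem.Int.mod_eq_emod_of_pos (by omega)]; simp; omega)]
      rw [pvGroupTail, if_neg hlen]

lemma pvGroupTail_take_drop (l : List (List Char)) : ∀ (block : List (List Char)),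
    block ≠ [] → block.length < 10 →
    pvGroupTail block l =
      PySem.Chars.join [] (block ++ l.take (10 - block.length)) ::
        pvGroupTail [] (l.drop (10 - block.length)) := by
  induction l with
  | nil =>
    intro block hne hlt
    simp [pvGroupTail, hne]
  | cons s rest ih =>
    intro block hne hlt
    rw [pvGroupTail]
    by_cases hlen : block.length + 1 = 10
    · have h1 : 10 - block.length = 1 := by omega
      simp [hlen, h1]
    · have h1 : 10 - block.length = (10 - (block ++ [s]).length) + 1 := by
        simp; omega
      rw [if_neg hlen, ih (block ++ [s]) (by simp) (by simp; omega), h1]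
      simp

lemma pvGroupTail_nil_eq_chunks (l : List (List Char)) :
    pvGroupTail [] l = (pvChunks l).map (PySem.Chars.join []) := by
  induction l using pvChunks.induct with
  | case1 => simp [pvGroupTail, pvChunks]
  | case2 l h ih =>
    conv_rhs => rw [pvChunks, dif_neg h]
    rw [List.map_cons, ← ih]
    obtain ⟨s, rest, rfl⟩ := List.exists_cons_of_ne_nil h
    rw [pvGroupTail, if_neg (by simp), List.nil_append]
    rw [pvGroupTail_take_drop rest [s] (by simp) (by simp)]
    rw [show List.take 10 (s :: rest) = s :: List.take 9 rest from rfl,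
        show List.drop 10 (s :: rest) = List.drop 9 rest from rfl]
    simp

lemma pvChunks_map {α β : Type} (f : α → β) (l : List α) :
    pvChunks (l.map f) = (pvChunks l).map (List.map f) := by
  induction l using pvChunks.induct with
  | case1 => simp [pvChunks]
  | case2 l h ih =>
    conv_rhs => rw [pvChunks, dif_neg h]
    conv_lhs => rw [pvChunks, dif_neg (by simpa using h)]
    rw [List.map_cons, ← List.map_take, ← List.map_drop, ih]

lemma pvRange10_cons (b : Int) (hb : 0 < b) :
    PySem.List.pyRange 0 b 10 = 0 :: (PySem.List.pyRange 0 (b - 10) 10).map (· + 10) := by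
  rw [PySem.List.pyRange_of_pos _ _ (by omega), PySem.List.pyRange_of_pos _ _ (by omega)]
  by_cases h10 : b ≤ 10
  · have h1 : (if (0:Int) < b then ((b - 0 + 10 - 1) / 10).toNat else 0) = 1 := by
      rw [if_pos hb]; omega
    have h2 : (if (0:Int) < b - 10 then ((b - 10 - 0 + 10 - 1) / 10).toNat else 0) = 0 := by
      rw [if_neg (by omega)]
    rw [h1, h2]
    simp
  · have h1 : (if (0:Int) < b then ((b - 0 + 10 - 1) / 10).toNat else 0) =
        (if (0:Int) < b - 10 then ((b - 10 - 0 + 10 - 1) / 10).toNat else 0) + 1 := by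
      rw [if_pos hb, if_pos (by omega)]; omega
    rw [h1, List.range_succ_eq_map]
    simp only [List.map_cons, List.map_map]
    refine congrArg₂ List.cons (by simp) (List.map_congr_left fun k _ => ?_)
    simp [Nat.succ_eq_add_one]
    ring

lemma pvSliceShift {α : Type} (s : List α) (i : Int) (hi : 0 ≤ i) :
    PySem.List.slice s (some (i + 10)) (some (i + 10 + 10)) =
      PySem.List.slice (s.drop 10) (some i) (some (i + 10)) := by
  rw [PySem.List.slice_toNat _ (by omega) (by omega),
      PySem.List.slice_toNat _ (by omega) (by omega), List.drop_drop]
  congr 1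
  · omega
  · congr 1
    omega

lemma pvBlocksB (s : List Char) :
    (PySem.List.pyRange 0 (s.length : Int) 10).map (fun i =>
        PySem.Chars.join [] ((PySem.List.slice s (some i) (some (i + 10))).map pvSpanB)) =
      (pvChunks s).map (fun ch => PySem.Chars.join [] (ch.map pvSpanB)) := by
  induction s using pvChunks.induct with
  | case1 => simp [pvChunks, PySem.List.pyRange]
  | case2 s h ih =>
    have hlen : (0:Int) < s.length := by
      simpa using List.length_pos_iff.mpr h
    conv_rhs => rw [pvChunks, dif_neg h]
    rw [pvRange10_cons _ hlen, List.map_cons, List.map_map, List.map_cons]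
    have hrange : PySem.List.pyRange 0 ((s.length : Int) - 10) 10 =
        PySem.List.pyRange 0 ((s.drop 10).length : Int) 10 := by
      by_cases h10 : 10 ≤ s.length
      · have : ((s.drop 10).length : Int) = (s.length : Int) - 10 := by
          simp [List.length_drop]; omega
        rw [this]
      · rw [PySem.List.pyRange_of_pos _ _ (show (0:Int) < 10 by omega),
            PySem.List.pyRange_of_pos _ _ (show (0:Int) < 10 by omega),
            if_neg (by omega), if_neg (by simp [List.length_drop]; omega)]
    refine congrArg₂ List.cons ?_ ?_
    · rw [PySem.List.slice_toNat _ (by omega) (by omega)]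
      simp
    · rw [hrange, ← ih]
      refine List.map_congr_left fun i hiMem => ?_
      have hi : 0 ≤ i := ((PySem.List.mem_pyRange_iff_of_pos (by omega) i).mp hiMem).1
      simp only [Function.comp]
      rw [pvSliceShift s i hi]

-- ===== VERDICT (by name: the statement is the Claim_ definition above) =====
theorem colorize_seq_py_spec : Claim_equal_colorize_seq_py := by
  intro seq _
  unfold Spec_colorize_seq_py colorize_seq_py colorize_seq_py_alt
  simp only []
  have hf : (fun (acc : List (List Char)) (c : Char) =>
      acc ++ [if c = 'A' ∨ c = 'U' ∨ c = 'G' ∨ c = 'C' then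
                "<span class=\"base-".toList ++ [c] ++ "\">".toList ++ [c] ++ "</span>".toList
              else if c = '-' ∨ c = '.' then
                "<span style=\"color:#4a5568\">".toList ++ [c] ++ "</span>".toList
              else
                "<span style=\"color:#94a3b8\">".toList ++ [c] ++ "</span>".toList]) =
      (fun acc c => acc ++ [pvSpanB c]) := rfl
  rw [hf, PySem.List.foldl_append_singleton_eq_map pvSpanB (PySem.Chars.upper seq.toList) []]
  have hsA : (fun (st : List (List Char) × List (List Char)) (is : Int × List Char) =>
      if PySem.Int.mod (is.1 + 1) 10 = 0 then (st.1 ++ [PySem.Chars.join [] (st.2 ++ [is.2])], ([] : List (List Char)))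
      else (st.1, st.2 ++ [is.2])) = pvStepA := rfl
  rw [List.nil_append, hsA]
  have hA := pvGroupA ((PySem.Chars.upper seq.toList).map pvSpanB) 0 [] [] (by omega) (by decide)
  rw [pvFlush] at hA
  rw [hA, List.nil_append, pvGroupTail_nil_eq_chunks, pvChunks_map, pvBlocksB]
  rw [List.map_map]
  rfl
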